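-- pv_equiv track=rewrite | github.com/wear99/filemanage | Apps/parts/search.py | parent_sn
-- ===== SOURCE A (Python) =====
-- def parent_sn(sn):
--     s = ''
--     parent_sn=[]
--     for n in sn.split("."):  # 拼接父项的sn号码
--         if not n:
--             continue
--         if s:
--             s = s+'.'+str(n)
--         else:
--             s = str(n)
--         parent_sn.append(s)
--
--     return parent_sn
-- ===== SOURCE B (Python) =====
-- def parent_sn(sn):
--     parts = [n for n in sn.split('.') if n]
--     return [".".join(parts[:i + 1]) for i in range(len(parts))]
-- ===== Notes on version B (the rewrite author's own statement) =====
-- stated objective: simpler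
-- what changed: B filters the non-empty parts once and builds each result independently as a join of a prefix slice, instead of threading a running accumulator string and a skip branch through the loop.
import Mathlib
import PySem

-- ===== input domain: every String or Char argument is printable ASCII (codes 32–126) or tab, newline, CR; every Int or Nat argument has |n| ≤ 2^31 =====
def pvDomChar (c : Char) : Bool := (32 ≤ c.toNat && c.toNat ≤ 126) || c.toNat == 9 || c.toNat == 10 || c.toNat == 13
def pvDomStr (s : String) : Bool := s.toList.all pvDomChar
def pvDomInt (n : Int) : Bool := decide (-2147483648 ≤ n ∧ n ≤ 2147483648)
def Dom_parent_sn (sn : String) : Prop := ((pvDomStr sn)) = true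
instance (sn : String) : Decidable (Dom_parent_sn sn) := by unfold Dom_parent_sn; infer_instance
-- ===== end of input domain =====

-- B builds each result independently by joining a prefix of the filtered parts list,
-- instead of A's running accumulator string with a skip branch; return values are proved equal.

-- ===== PORT A =====
-- A's loop: state (s, parent_sn); strings are carried as List Char (Python '+' = ++).
def parentStep (st : List Char × List (List Char)) (n : List Char) : List Char × List (List Char) :=
  if n = [] then st
  else
    let s := if st.1 ≠ [] then st.1 ++ ['.'] ++ n else n
    (s, st.2 ++ [s])

def parent_sn (sn : String) : List String :=
  ((PySem.Chars.splitOn sn.toList ['.']).foldl parentStep ([], [])).2.map String.ofList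

-- ===== PORT B =====
def parent_sn_alt (sn : String) : List String :=
  let parts := (PySem.Chars.splitOn sn.toList ['.']).filter (fun n => n ≠ [])
  (List.range parts.length).map
    (fun i => String.ofList (PySem.Chars.join ['.'] (parts.take (i + 1))))

-- ===== PRECONDITION & SPEC =====
def Spec_parent_sn (sn : String) (out : List String) : Prop := out = parent_sn_alt sn
instance (sn : String) (out : List String) : Decidable (Spec_parent_sn sn out) := by unfold Spec_parent_sn; infer_instance

-- ===== CLAIM (what is proved, stated in full; the proofs are below) =====
def Claim_equal_parent_sn : Prop := ∀ (sn : String), Dom_parent_sn sn → Spec_parent_sn sn (parent_sn sn)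

-- ===== LEMMAS AND PROOFS =====

-- A's skip branch is a filter: empty pieces leave the state unchanged.
theorem foldl_parentStep_filter (ws : List (List Char)) (st : List Char × List (List Char)) :
    ws.foldl parentStep st = (ws.filter (fun n => n ≠ [])).foldl parentStep st := by
  induction ws generalizing st with
  | nil => rfl
  | cons w ws ih =>
    by_cases hw : w = []
    · simp [hw, parentStep, ih]
    · simp [hw, ih]

theorem join_append_singleton (pref : List (List Char)) (hp : pref ≠ []) (p : List Char) :
    PySem.Chars.join ['.'] (pref ++ [p]) = PySem.Chars.join ['.'] pref ++ ['.'] ++ p := by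
  induction pref with
  | nil => exact absurd rfl hp
  | cons a t ih =>
    cases t with
    | nil => simp [PySem.Chars.join_cons_cons, PySem.Chars.join_singleton]
    | cons b t' =>
      have := ih (by simp)
      simp only [List.cons_append, PySem.Chars.join_cons_cons] at *
      simp [this]

theorem foldl_parentStep_inv (parts : List (List Char))
    (h : ∀ n ∈ parts, n ≠ []) (pref : List (List Char)) (acc : List (List Char))
    (hpref : PySem.Chars.join ['.'] pref ≠ []) (hp0 : pref ≠ []) :
    (parts.foldl parentStep (PySem.Chars.join ['.'] pref, acc)).2
      = acc ++ (List.range parts.length).map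
          (fun i => PySem.Chars.join ['.'] (pref ++ parts.take (i + 1))) := by
  induction parts generalizing pref acc with
  | nil => simp
  | cons p ps ih =>
    have hpne : p ≠ [] := h p (by simp)
    have hstep : parentStep (PySem.Chars.join ['.'] pref, acc) p
        = (PySem.Chars.join ['.'] (pref ++ [p]), acc ++ [PySem.Chars.join ['.'] (pref ++ [p])]) := by
      simp [parentStep, hpne, hpref, join_append_singleton pref hp0 p]
    have hne' : PySem.Chars.join ['.'] (pref ++ [p]) ≠ [] := by
      rw [join_append_singleton pref hp0 p]; simp
    rw [List.foldl_cons, hstep,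
      ih (fun n hn => h n (by simp [hn])) (pref ++ [p]) _ hne' (by simp)]
    simp only [List.length_cons, List.range_succ_eq_map]
    simp [List.map_map, Function.comp, List.append_assoc]

-- ===== VERDICT (by name: the statement is the Claim_ definition above) =====
theorem parent_sn_spec : Claim_equal_parent_sn := by
  intro sn _
  show parent_sn sn = parent_sn_alt sn
  unfold parent_sn parent_sn_alt
  rw [foldl_parentStep_filter]
  set parts := (PySem.Chars.splitOn sn.toList ['.']).filter (fun n => n ≠ []) with hparts
  have hmem : ∀ n ∈ parts, n ≠ [] := by
    intro n hn
    have := List.of_mem_filter hn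
    simpa using this
  cases hpc : parts with
  | nil => simp
  | cons p ps =>
    have hpne : p ≠ [] := hmem p (by rw [hpc]; simp)
    have hstep : parentStep ([], []) p = (p, [p]) := by
      simp [parentStep, hpne]
    have hj : PySem.Chars.join ['.'] [p] = p := PySem.Chars.join_singleton _ _
    rw [List.foldl_cons, hstep]
    have := foldl_parentStep_inv ps
      (fun n hn => hmem n (by rw [hpc]; simp [hn])) [p] [p]
      (by rw [hj]; exact hpne) (by simp)
    rw [hj] at this
    rw [this]
    simp only [List.length_cons, List.range_succ_eq_map]
    simp [List.map_map, Function.comp, hj]
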